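-- pv_equiv track=rewrite | github.com/tulu-g559/ClauseEase_app | viz/plot_clause_distribution.py | calculate_clause_lengths
-- ===== SOURCE A (Python) =====
-- from collections import Counter
--
-- def calculate_clause_lengths(results):
--     """Calculate word count for each clause and convert to buckets."""
--     buckets = []
--
--     for clause in results:
--         text = clause.get("cleaned") or ""
--         word_count = len(text.split())
--
--         # Categorize into buckets
--         if word_count <= 20:
--             buckets.append("0–20 words")
--         elif word_count <= 50:
--             buckets.append("21–50 words")
--         elif word_count <= 100:
--             buckets.append("51–100 words")
--         elif word_count <= 150:
--             buckets.append("101–150 words")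
--         else:
--             buckets.append("150+ words")
--
--     return Counter(buckets)
-- ===== SOURCE B (Python) =====
-- _THRESHOLDS = [20, 50, 100, 150]
-- _LABELS = ["0–20 words", "21–50 words", "51–100 words", "101–150 words", "150+ words"]
--
-- def calculate_clause_lengths(results):
--     """Staged passes instead of an accumulating loop: first map every clause to its
--     bucket index (number of thresholds strictly below its word count), then build
--     the result by counting each distinct index over the whole index list, in
--     first-occurrence order (which is exactly Counter's iteration order)."""
--     idxs = [sum(t < len((c.get("cleaned") or "").split()) for t in _THRESHOLDS)
--             for c in results]
--     return {_LABELS[i]: idxs.count(i) for i in dict.fromkeys(idxs)}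
-- ===== Notes on version B (the rewrite author's own statement) =====
-- stated objective: alternative
-- what changed: Replaces the single accumulating loop (if/elif cascade appending to a bucket list, then Counter) with staged passes: a comprehension maps each clause to a threshold-table bucket index, then the result is built by counting each distinct index over the whole index list with list.count in first-occurrence order (dict.fromkeys), with no accumulator at all.
import Mathlib
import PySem

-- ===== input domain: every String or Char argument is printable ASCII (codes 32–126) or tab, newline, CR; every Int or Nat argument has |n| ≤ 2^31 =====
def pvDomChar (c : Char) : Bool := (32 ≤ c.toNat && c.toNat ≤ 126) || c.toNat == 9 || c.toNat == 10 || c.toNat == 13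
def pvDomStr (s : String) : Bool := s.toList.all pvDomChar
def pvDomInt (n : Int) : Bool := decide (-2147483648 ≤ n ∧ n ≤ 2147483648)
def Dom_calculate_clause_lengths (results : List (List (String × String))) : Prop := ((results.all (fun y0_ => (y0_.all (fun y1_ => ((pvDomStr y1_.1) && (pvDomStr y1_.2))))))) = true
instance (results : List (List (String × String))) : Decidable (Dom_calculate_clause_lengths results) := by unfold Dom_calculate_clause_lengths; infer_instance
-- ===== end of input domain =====

-- B replaces A's accumulating loop (if/elif cascade + bucket list + Counter) by staged passes:
-- map each clause to a threshold-table bucket index, then count each distinct index with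
-- list.count in first-occurrence order (objective: alternative; not faster).

-- ===== PORT A =====
def calculate_clause_lengths (results : List (List (String × String))) : List (String × Int) :=
  let buckets : List String := results.foldl (fun buckets clause =>
    -- text = clause.get("cleaned") or "" : both the missing-key and the empty-string case yield ""
    let text := PySem.Dict.getD (PySem.Dict.mk clause) "cleaned" ""
    let word_count : Int := ((PySem.Str.split₀ text).length : Int)
    if word_count ≤ 20 then buckets ++ ["0–20 words"]
    else if word_count ≤ 50 then buckets ++ ["21–50 words"]
    else if word_count ≤ 100 then buckets ++ ["51–100 words"]
    else if word_count ≤ 150 then buckets ++ ["101–150 words"]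
    else buckets ++ ["150+ words"]) []
  (PySem.Dict.counter buckets).items

-- ===== PORT B =====
def pvThresholds : List Int := [20, 50, 100, 150]
def pvLabels : List String := ["0–20 words", "21–50 words", "51–100 words", "101–150 words", "150+ words"]

def calculate_clause_lengths_alt (results : List (List (String × String))) : List (String × Int) :=
  -- idxs = [sum(t < len((c.get("cleaned") or "").split()) for t in _THRESHOLDS) for c in results]
  let idxs : List Int := results.map (fun c =>
    (pvThresholds.map (fun t =>
      if t < ((PySem.Str.split₀ (PySem.Dict.getD (PySem.Dict.mk c) "cleaned" "")).length : Int)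
      then (1 : Int) else 0)).sum)
  -- {_LABELS[i]: idxs.count(i) for i in dict.fromkeys(idxs)} ; i is always 0..4, .getD "" only totalises
  (PySem.List.dedup idxs).map (fun i =>
    ((PySem.List.pyGet? pvLabels i).getD "", (PySem.List.count idxs i : Int)))

-- ===== PRECONDITION & SPEC =====
def Spec_calculate_clause_lengths (results : List (List (String × String))) (out : List (String × Int)) : Prop := out = calculate_clause_lengths_alt results
instance (results : List (List (String × String))) (out : List (String × Int)) : Decidable (Spec_calculate_clause_lengths results out) := by unfold Spec_calculate_clause_lengths; infer_instance

-- ===== CLAIM =====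
def Claim_equal_calculate_clause_lengths : Prop := ∀ (results : List (List (String × String))), Dom_calculate_clause_lengths results → Spec_calculate_clause_lengths results (calculate_clause_lengths results)

-- ===== LEMMAS AND PROOFS =====

-- bucket index of one clause (B's per-clause value; proof-side abbreviation)
def pvIdx (clause : List (String × String)) : Int :=
  (pvThresholds.map (fun t =>
    if t < ((PySem.Str.split₀ (PySem.Dict.getD (PySem.Dict.mk clause) "cleaned" "")).length : Int)
    then (1 : Int) else 0)).sum

-- label lookup (B's table)
def pvLabelOf (i : Int) : String := (PySem.List.pyGet? pvLabels i).getD ""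

-- the label A computes for one clause (proof-side abbreviation)
def pvLabel (clause : List (String × String)) : String :=
  let word_count : Int :=
    ((PySem.Str.split₀ (PySem.Dict.getD (PySem.Dict.mk clause) "cleaned" "")).length : Int)
  if word_count ≤ 20 then "0–20 words"
  else if word_count ≤ 50 then "21–50 words"
  else if word_count ≤ 100 then "51–100 words"
  else if word_count ≤ 150 then "101–150 words"
  else "150+ words"

theorem pvIdx_nonneg (c : List (String × String)) : 0 ≤ pvIdx c ∧ pvIdx c ≤ 4 := by
  unfold pvIdx pvThresholds
  simp only [List.map_cons, List.map_nil, List.sum_cons, List.sum_nil]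
  split_ifs <;> omega

-- A's if/elif label of a clause is B's table lookup at the clause's bucket index
theorem pvLabel_eq (c : List (String × String)) : pvLabel c = pvLabelOf (pvIdx c) := by
  unfold pvLabel pvLabelOf pvIdx pvThresholds
  set wc : Int := ((PySem.Str.split₀ (PySem.Dict.getD (PySem.Dict.mk c) "cleaned" "")).length : Int) with hwc
  have h0 : 0 ≤ wc := Int.natCast_nonneg _
  simp only [List.map_cons, List.map_nil, List.sum_cons, List.sum_nil]
  by_cases h1 : wc ≤ 20
  · simp [h1, show ¬(20 < wc) by omega, show ¬(50 < wc) by omega,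
      show ¬(100 < wc) by omega, show ¬(150 < wc) by omega, pvLabels, PySem.List.pyGet?, PySem.List.pyIdx?]
  · by_cases h2 : wc ≤ 50
    · simp [h1, h2, show (20 < wc) by omega, show ¬(50 < wc) by omega,
        show ¬(100 < wc) by omega, show ¬(150 < wc) by omega, pvLabels, PySem.List.pyGet?, PySem.List.pyIdx?]
    · by_cases h3 : wc ≤ 100
      · simp [h1, h2, h3, show (20 < wc) by omega, show (50 < wc) by omega,
          show ¬(100 < wc) by omega, show ¬(150 < wc) by omega, pvLabels, PySem.List.pyGet?, PySem.List.pyIdx?]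
      · by_cases h4 : wc ≤ 150
        · simp [h1, h2, h3, h4, show (20 < wc) by omega, show (50 < wc) by omega,
            show (100 < wc) by omega, show ¬(150 < wc) by omega, pvLabels, PySem.List.pyGet?, PySem.List.pyIdx?]
        · simp [h1, h2, h3, h4, show (20 < wc) by omega, show (50 < wc) by omega,
            show (100 < wc) by omega, show (150 < wc) by omega, pvLabels, PySem.List.pyGet?, PySem.List.pyIdx?]

-- pvLabelOf is injective on 0..4 (the five labels are pairwise distinct)
theorem pvLabelOf_inj (i j : Int) (hi : 0 ≤ i ∧ i ≤ 4) (hj : 0 ≤ j ∧ j ≤ 4)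
    (h : pvLabelOf i = pvLabelOf j) : i = j := by
  obtain ⟨hi1, hi2⟩ := hi
  obtain ⟨hj1, hj2⟩ := hj
  interval_cases i <;> interval_cases j <;> first | rfl | (exfalso; revert h; decide)

-- Set.add-folding commutes with a map injective on all elements involved
theorem foldl_add_map_of_inj {α β : Type} [DecidableEq α] [DecidableEq β] (f : α → β)
    (xs s : List α)
    (hinj : ∀ a ∈ s ++ xs, ∀ b ∈ s ++ xs, f a = f b → a = b) :
    (xs.map f).foldl PySem.Set.add (s.map f) = (xs.foldl PySem.Set.add s).map f := by
  induction xs generalizing s with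
  | nil => rfl
  | cons x t ih =>
    have hx : x ∈ s ++ x :: t := by simp
    have hadd : PySem.Set.add (s.map f) (f x) = (PySem.Set.add s x).map f := by
      by_cases hmem : x ∈ s
      · have : f x ∈ s.map f := List.mem_map_of_mem hmem
        simp [PySem.Set.add, PySem.Set.contains, hmem, this]
      · have : f x ∉ s.map f := by
          intro hfx
          rcases List.mem_map.mp hfx with ⟨a, ha, hfa⟩
          exact hmem (hinj a (by simp [ha]) x hx hfa ▸ ha)
        simp [PySem.Set.add, PySem.Set.contains, hmem, this]
    simp only [List.map_cons, List.foldl_cons, hadd]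
    refine ih (PySem.Set.add s x) ?_
    intro a ha b hb
    have hsub : ∀ c, c ∈ PySem.Set.add s x ++ t → c ∈ s ++ x :: t := by
      intro c hc
      rcases List.mem_append.mp hc with hc | hc
      · by_cases hmem : x ∈ s <;> simp [PySem.Set.add, PySem.Set.contains, hmem] at hc <;>
          [skip; rcases hc with hc | hc] <;> simp [hc]
      · simp [hc]
    exact hinj a (hsub a ha) b (hsub b hb)

-- ofList commutes with a map injective on the list's elements
theorem ofList_map_of_inj {α β : Type} [DecidableEq α] [DecidableEq β] (f : α → β)
    (xs : List α)
    (hinj : ∀ a ∈ xs, ∀ b ∈ xs, f a = f b → a = b) :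
    PySem.Set.ofList (xs.map f) = (PySem.Set.ofList xs).map f := by
  rw [PySem.Set.ofList_eq_foldl, PySem.Set.ofList_eq_foldl]
  exact foldl_add_map_of_inj f xs [] (by simpa using hinj)

-- counting an image value under a map injective on the list's elements
theorem count_map_of_inj {α β : Type} [DecidableEq α] [DecidableEq β] (f : α → β) (xs : List α)
    (a : α) (hinj : ∀ b ∈ xs, f b = f a → b = a) :
    (xs.map f).count (f a) = xs.count a := by
  induction xs with
  | nil => rfl
  | cons x t ih =>
    simp only [List.map_cons, List.count_cons]
    rw [ih (fun b hb => hinj b (List.mem_cons_of_mem _ hb))]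
    by_cases hx : x = a
    · simp [hx]
    · have : ¬ (f x = f a) := fun h => hx (hinj x (List.mem_cons_self) h)
      simp [hx, this]

-- ===== VERDICT =====
theorem calculate_clause_lengths_spec : Claim_equal_calculate_clause_lengths := by
  intro results _
  unfold Spec_calculate_clause_lengths calculate_clause_lengths calculate_clause_lengths_alt
  have hstep : (fun (buckets : List String) (clause : List (String × String)) =>
      let text := PySem.Dict.getD (PySem.Dict.mk clause) "cleaned" ""
      let word_count : Int := ((PySem.Str.split₀ text).length : Int)
      if word_count ≤ 20 then buckets ++ ["0–20 words"]
      else if word_count ≤ 50 then buckets ++ ["21–50 words"]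
      else if word_count ≤ 100 then buckets ++ ["51–100 words"]
      else if word_count ≤ 150 then buckets ++ ["101–150 words"]
      else buckets ++ ["150+ words"])
      = fun buckets clause => buckets ++ [pvLabel clause] := by
    funext buckets clause
    simp only [pvLabel]
    split_ifs <;> rfl
  rw [hstep]
  dsimp only
  rw [PySem.List.foldl_append_singleton_eq_map, List.nil_append, PySem.Dict.items_counter]
  have hidx : (fun c : List (String × String) =>
      (pvThresholds.map (fun t =>
        if t < ((PySem.Str.split₀ (PySem.Dict.getD (PySem.Dict.mk c) "cleaned" "")).length : Int)
        then (1 : Int) else 0)).sum) = pvIdx := rfl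
  rw [hidx]
  have hbs : List.map pvLabel results = (List.map pvIdx results).map pvLabelOf := by
    rw [List.map_map]
    exact List.map_congr_left (fun c _ => pvLabel_eq c)
  have hbound : ∀ i ∈ List.map pvIdx results, 0 ≤ i ∧ i ≤ 4 := by
    intro i hi
    rcases List.mem_map.mp hi with ⟨c, _, rfl⟩
    exact pvIdx_nonneg c
  have hinj : ∀ a ∈ List.map pvIdx results, ∀ b ∈ List.map pvIdx results,
      pvLabelOf a = pvLabelOf b → a = b := fun a ha b hb h =>
    pvLabelOf_inj a b (hbound a ha) (hbound b hb) h
  rw [hbs, ofList_map_of_inj pvLabelOf _ hinj, List.map_map,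
      PySem.List.dedup_eq_ofList]
  refine List.map_congr_left ?_
  intro i hi
  have hi' : i ∈ List.map pvIdx results := by
    have := PySem.Set.mem_ofList (y := i) (xs := List.map pvIdx results)
    exact this.mp hi
  simp only [Function.comp, pvLabelOf, PySem.List.count_eq, Prod.mk.injEq, true_and]
  congr 1
  exact_mod_cast count_map_of_inj pvLabelOf _ i
    (fun b hb h => pvLabelOf_inj b i (hbound b hb) (hbound i hi') h)
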